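-- pv_equiv track=rewrite | github.com/biolxy/TCGA_HLA_benchmark | analysis_scripts/Error_rate_of_HLA_Class_alleles_in_eight_tools/class2/get.WF.py | compareAlleltList
-- ===== SOURCE A (Python) =====
-- def compareAlleltList(list1, list2, dict1):
--     # list1 is result
--     for x, item in enumerate(list1):
--         if item != list2[x]:
--             error_allele = list2[x]
--             if not dict1[item][error_allele]:
--                 dict1[item][error_allele] = 0
--             dict1[item][error_allele] += 1
--     return dict1
-- ===== SOURCE B (Python) =====
-- def compareAlleltList(list1, list2, dict1):
--     # list1 is result
--     counts = {}
--     for a, b in zip(list1, list2):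
--         if a != b:
--             counts[(a, b)] = counts.get((a, b), 0) + 1
--     for (a, b), n in counts.items():
--         if not dict1[a][b]:
--             dict1[a][b] = 0
--         dict1[a][b] += n
--     return dict1
-- ===== Notes on version B (the rewrite author's own statement) =====
-- stated objective: alternative
-- what changed: Instead of interleaving comparison and nested-dict mutation in one indexed loop, B first aggregates mismatched (result, error) pairs into a counter in one pass over zip(list1, list2) and then applies each aggregated count to dict1 once per distinct pair.
import Mathlib
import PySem

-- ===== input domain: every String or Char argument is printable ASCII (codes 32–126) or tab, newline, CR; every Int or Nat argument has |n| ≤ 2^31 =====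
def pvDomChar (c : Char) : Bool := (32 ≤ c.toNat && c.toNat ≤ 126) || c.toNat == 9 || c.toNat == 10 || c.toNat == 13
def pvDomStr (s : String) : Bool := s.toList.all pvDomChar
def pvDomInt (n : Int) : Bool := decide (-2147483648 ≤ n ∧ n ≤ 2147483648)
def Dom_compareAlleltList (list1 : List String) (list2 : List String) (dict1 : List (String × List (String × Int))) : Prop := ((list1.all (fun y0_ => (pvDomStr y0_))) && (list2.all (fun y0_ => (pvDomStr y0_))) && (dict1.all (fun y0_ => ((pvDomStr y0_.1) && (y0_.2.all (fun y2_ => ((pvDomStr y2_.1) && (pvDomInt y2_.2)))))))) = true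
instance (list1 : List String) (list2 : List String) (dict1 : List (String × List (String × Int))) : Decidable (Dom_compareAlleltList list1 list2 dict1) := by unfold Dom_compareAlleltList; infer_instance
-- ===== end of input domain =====

-- B replaces A's interleaved index-loop-and-mutate with two passes: a counter of mismatched pairs, then one nested update per distinct pair (alternative decomposition, same asymptotic cost).
-- A mutates dict1 in place and returns it; the equivalence proved here is about the return value only.


-- shared dict primitives (association lists in insertion order; Pre_ guarantees every
-- accessed key exists and the lists are duplicate-free, so first-match lookup / overwrite
-- is exactly Python's dict read / item assignment)
def lkO : List (String × List (String × Int)) → String → Option (List (String × Int))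
  | [], _ => none
  | (k, v) :: t, a => if k = a then some v else lkO t a

def lkI : List (String × Int) → String → Option Int
  | [], _ => none
  | (k, v) :: t, b => if k = b then some v else lkI t b

-- dict1[a][b]; Python raises KeyError when missing — that case is excluded by Pre_, the 0 default is never the claimed value there
def readD (d : List (String × List (String × Int))) (a b : String) : Int :=
  ((lkO d a).bind (fun i => lkI i b)).getD 0

def setI : List (String × Int) → String → Int → List (String × Int)
  | [], _, _ => []
  | (k, v) :: t, b, w => if k = b then (k, w) :: t else (k, v) :: setI t b w

-- dict1[a][b] = w; exact when the nested key exists (guaranteed: Python reads it first)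
def setN : List (String × List (String × Int)) → String → String → Int → List (String × List (String × Int))
  | [], _, _, _ => []
  | (k, inner) :: t, a, b, w => if k = a then (k, setI inner b w) :: t else (k, inner) :: setN t a b w

-- ===== PORT A =====
-- the for-loop over enumerate(list1), carrying the index x
def goA : List String → List String → Nat → List (String × List (String × Int)) → List (String × List (String × Int))
  | [], _, _, d => d
  | item :: rest, l2, x, d =>
    let d' :=
      match PySem.List.pyGet? l2 (Int.ofNat x) with
      | none => d        -- IndexError in Python; excluded by Pre_
      | some err =>
        if item ≠ err then
          let cur := readD d item err
          let cur := if cur = 0 then 0 else cur   -- `if not ...: dict1[item][err] = 0`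
          setN d item err (cur + 1)               -- `dict1[item][err] += 1`
        else d
    goA rest l2 (x + 1) d'

def compareAlleltList (list1 : List String) (list2 : List String) (dict1 : List (String × List (String × Int))) : List (String × List (String × Int)) :=
  goA list1 list2 0 dict1

-- ===== PORT B =====
-- counts[(a,b)] = counts.get((a,b), 0) + 1  (insertion-order counter)
def incr : List ((String × String) × Int) → (String × String) → List ((String × String) × Int)
  | [], p => [(p, 1)]
  | (q, n) :: t, p => if q = p then (q, n + 1) :: t else (q, n) :: incr t p

def compareAlleltList_alt (list1 : List String) (list2 : List String) (dict1 : List (String × List (String × Int))) : List (String × List (String × Int)) :=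
  let counts := (list1.zip list2).foldl (fun c p => if p.1 ≠ p.2 then incr c p else c) []
  counts.foldl (fun d pn =>
    let cur := readD d pn.1.1 pn.1.2
    let cur := if cur = 0 then 0 else cur   -- `if not dict1[a][b]: dict1[a][b] = 0`
    setN d pn.1.1 pn.1.2 (cur + pn.2)) dict1

-- ===== PRECONDITION & SPEC =====
-- Pre_ excludes exactly: list2 shorter than list1 (A raises IndexError), a mismatched pair
-- whose outer or inner key is absent from dict1 (A raises KeyError), and association lists
-- with duplicate outer or inner keys, which do not arise from a Python dict.
def Pre_compareAlleltList (list1 : List String) (list2 : List String) (dict1 : List (String × List (String × Int))) : Prop :=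
  list1.length ≤ list2.length ∧
  (∀ p ∈ list1.zip list2, p.1 ≠ p.2 → (((lkO dict1 p.1).bind (fun i => lkI i p.2)).isSome = true)) ∧
  (dict1.map Prod.fst).Nodup ∧
  (∀ e ∈ dict1, (e.2.map Prod.fst).Nodup)

instance (list1 : List String) (list2 : List String) (dict1 : List (String × List (String × Int))) : Decidable (Pre_compareAlleltList list1 list2 dict1) := by unfold Pre_compareAlleltList; infer_instance

def pvWitness_compareAlleltList : List String × List String × (List (String × List (String × Int))) :=
  (["A", "B"], ["A", "C"], [("B", [("C", 0)])])

def Spec_compareAlleltList (list1 : List String) (list2 : List String) (dict1 : List (String × List (String × Int))) (out : List (String × List (String × Int))) : Prop := out = compareAlleltList_alt list1 list2 dict1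
instance (list1 : List String) (list2 : List String) (dict1 : List (String × List (String × Int))) (out : List (String × List (String × Int))) : Decidable (Spec_compareAlleltList list1 list2 dict1 out) := by unfold Spec_compareAlleltList; infer_instance

-- ===== CLAIM (what is proved, stated in full; the proofs are below) =====
def Claim_equal_compareAlleltList : Prop := ∀ (list1 : List String) (list2 : List String) (dict1 : List (String × List (String × Int))), Dom_compareAlleltList list1 list2 dict1 → Pre_compareAlleltList list1 list2 dict1 → Spec_compareAlleltList list1 list2 dict1 (compareAlleltList list1 list2 dict1)

-- ===== LEMMAS AND PROOFS =====

-- add f a b to the value at every nested (a,b) slot: the common characterisation of both ports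
def mapAdd (d : List (String × List (String × Int))) (f : String → String → Int) : List (String × List (String × Int)) :=
  d.map (fun e => (e.1, e.2.map (fun e2 => (e2.1, e2.2 + f e.1 e2.1))))

def keyOk (d : List (String × List (String × Int))) (a b : String) : Prop :=
  ((lkO d a).bind (fun i => lkI i b)).isSome = true

def nodups (d : List (String × List (String × Int))) : Prop :=
  (d.map Prod.fst).Nodup ∧ (∀ e ∈ d, (e.2.map Prod.fst).Nodup)

def delta (a b : String) (n : Int) : String → String → Int :=
  fun x y => if x = a ∧ y = b then n else 0

def stepP (d : List (String × List (String × Int))) (p : String × String) : List (String × List (String × Int)) :=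
  if p.1 ≠ p.2 then
    let cur := readD d p.1 p.2
    let cur := if cur = 0 then 0 else cur
    setN d p.1 p.2 (cur + 1)
  else d

-- number of mismatched occurrences of (a,b)
def cntF (pairs : List (String × String)) (a b : String) : Int :=
  ((pairs.filter (fun p => p.1 ≠ p.2)).count (a, b) : Int)

theorem mapAdd_congr (d : List (String × List (String × Int))) (f g : String → String → Int)
    (h : ∀ a b, f a b = g a b) : mapAdd d f = mapAdd d g := by
  have : f = g := funext fun a => funext fun b => h a b
  rw [this]

theorem innerMap_zero (i : List (String × Int)) (g : String → Int)
    (h : ∀ e2 ∈ i, g e2.1 = 0) : i.map (fun e2 => (e2.1, e2.2 + g e2.1)) = i := by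
  induction i with
  | nil => rfl
  | cons e t ih =>
    simp only [List.map_cons]
    rw [h e (by simp), ih (fun e2 he2 => h e2 (by simp [he2]))]
    simp

theorem mapAdd_zero (d : List (String × List (String × Int))) (f : String → String → Int)
    (h : ∀ e ∈ d, ∀ e2 ∈ e.2, f e.1 e2.1 = 0) : mapAdd d f = d := by
  unfold mapAdd
  induction d with
  | nil => rfl
  | cons e t ih =>
    simp only [List.map_cons]
    rw [innerMap_zero e.2 _ (fun e2 he2 => h e (by simp) e2 he2),
        ih (fun e' he' e2 he2 => h e' (by simp [he']) e2 he2)]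

theorem mapAdd_comp (d : List (String × List (String × Int))) (f g : String → String → Int) :
    mapAdd (mapAdd d f) g = mapAdd d (fun a b => f a b + g a b) := by
  unfold mapAdd
  simp only [List.map_map]
  apply List.map_congr_left
  intro e _
  simp only [Function.comp]
  congr 1
  simp only [List.map_map]
  apply List.map_congr_left
  intro e2 _
  simp [add_assoc]

theorem mapAdd_cons (e : String × List (String × Int)) (t : List (String × List (String × Int))) (f : String → String → Int) :
    mapAdd (e :: t) f = (e.1, e.2.map (fun e2 => (e2.1, e2.2 + f e.1 e2.1))) :: mapAdd t f := rfl

theorem lkO_mapAdd (d : List (String × List (String × Int))) (f : String → String → Int) (a : String) :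
    lkO (mapAdd d f) a = (lkO d a).map (fun i => i.map (fun e2 => (e2.1, e2.2 + f a e2.1))) := by
  induction d with
  | nil => rfl
  | cons e t ih =>
    simp only [mapAdd, List.map_cons, lkO]
    by_cases h : e.1 = a
    · subst h; simp [lkO]
    · simp only [lkO, h, if_neg]
      exact ih

theorem lkI_map (i : List (String × Int)) (g : String → Int) (b : String) :
    lkI (i.map (fun e2 => (e2.1, e2.2 + g e2.1))) b = (lkI i b).map (fun v => v + g b) := by
  induction i with
  | nil => rfl
  | cons e t ih =>
    simp only [List.map_cons, lkI]
    by_cases h : e.1 = b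
    · subst h; simp
    · simp [h, ih]

theorem keyOk_mapAdd (d : List (String × List (String × Int))) (f : String → String → Int) (a b : String) :
    keyOk (mapAdd d f) a b ↔ keyOk d a b := by
  unfold keyOk
  rw [lkO_mapAdd]
  cases h : lkO d a with
  | none => simp
  | some i => simp [lkI_map]

theorem nodups_mapAdd (d : List (String × List (String × Int))) (f : String → String → Int)
    (h : nodups d) : nodups (mapAdd d f) := by
  obtain ⟨h1, h2⟩ := h
  constructor
  · have : (mapAdd d f).map Prod.fst = d.map Prod.fst := by
      unfold mapAdd; simp [List.map_map, Function.comp]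
    rw [this]; exact h1
  · intro e he
    unfold mapAdd at he
    simp only [List.mem_map] at he
    obtain ⟨e0, he0, rfl⟩ := he
    have : (e0.2.map (fun e2 => (e2.1, e2.2 + f e0.1 e2.1))).map Prod.fst = e0.2.map Prod.fst := by
      simp [List.map_map, Function.comp]
    simpa [this] using h2 e0 he0

-- the nested read-then-overwrite is the pointwise add at (a,b)
theorem setI_read (i : List (String × Int)) (b : String) (n : Int)
    (hk : (lkI i b).isSome = true) (hnd : (i.map Prod.fst).Nodup) :
    setI i b ((lkI i b).getD 0 + n) = i.map (fun e2 => (e2.1, e2.2 + (if e2.1 = b then n else 0))) := by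
  induction i with
  | nil => simp [lkI] at hk
  | cons e t ih =>
    obtain ⟨k, v⟩ := e
    simp only [List.map_cons, List.nodup_cons] at hnd
    by_cases h : k = b
    · have hL : lkI ((k, v) :: t) b = some v := by simp [lkI, h]
      rw [hL]
      simp only [Option.getD_some, setI, if_pos h, List.map_cons, if_pos h]
      have hz : ∀ e2 ∈ t, (fun x => if x = b then n else 0) e2.1 = 0 := by
        intro e2 he2
        have : e2.1 ≠ b := by
          intro hb
          exact hnd.1 (by rw [← h] at hb; exact hb ▸ List.mem_map_of_mem he2)
        simp [this]
      exact congrArg _ (innerMap_zero t (fun x => if x = b then n else 0) hz).symm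
    · have hL : lkI ((k, v) :: t) b = lkI t b := by simp [lkI, h]
      rw [hL] at hk ⊢
      simp only [setI, if_neg h, List.map_cons, if_neg h]
      rw [ih hk hnd.2]
      simp

theorem setN_read (d : List (String × List (String × Int))) (a b : String) (n : Int)
    (hk : keyOk d a b) (hnd : nodups d) :
    setN d a b (readD d a b + n) = mapAdd d (delta a b n) := by
  induction d with
  | nil => simp [keyOk, lkO] at hk
  | cons e t ih =>
    obtain ⟨k, inner⟩ := e
    obtain ⟨hn1, hn2⟩ := hnd
    simp only [List.map_cons] at hn1
    by_cases h : k = a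
    · have hO : lkO ((k, inner) :: t) a = some inner := by simp [lkO, h]
      have hkI : (lkI inner b).isSome = true := by simpa [keyOk, hO] using hk
      have hread : readD ((k, inner) :: t) a b = (lkI inner b).getD 0 := by
        simp [readD, hO]
      rw [hread]
      simp only [setN, if_pos h]
      rw [setI_read inner b n hkI (hn2 (k, inner) (by simp))]
      rw [mapAdd_cons]
      have ht : mapAdd t (delta a b n) = t := by
        apply mapAdd_zero
        intro e' he' e2 _
        have : e'.1 ≠ a := by
          intro ha
          exact (List.nodup_cons.mp hn1).1 (h ▸ ha ▸ List.mem_map_of_mem he')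
        simp [delta, this]
      rw [ht]
      congr 1
      exact congrArg (Prod.mk k) (List.map_congr_left (fun e2 _ => by simp [delta, h]))
    · have hO : lkO ((k, inner) :: t) a = lkO t a := by simp [lkO, h]
      have hk' : keyOk t a b := by simpa [keyOk, hO] using hk
      have hread : readD ((k, inner) :: t) a b = readD t a b := by simp [readD, hO]
      rw [hread]
      simp only [setN, if_neg h]
      rw [mapAdd_cons]
      have hh : mapAdd t (delta a b n) = setN t a b (readD t a b + n) :=
        (ih hk' ⟨(List.nodup_cons.mp hn1).2, fun e' he' => hn2 e' (by simp [he'])⟩).symm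
      rw [hh]
      congr 1
      exact congrArg (Prod.mk k) (innerMap_zero inner (fun x => delta a b n k x) (fun e2 _ => by simp [delta, h])).symm

theorem reset_add (c n : Int) : (if c = 0 then 0 else c) + n = c + n := by
  split <;> simp_all

-- A's loop over the zipped pairs
theorem goA_eq_foldP (l1 l2 : List String) (x : Nat) (d : List (String × List (String × Int)))
    (h : x + l1.length ≤ l2.length) :
    goA l1 l2 x d = (l1.zip (l2.drop x)).foldl stepP d := by
  induction l1 generalizing x d with
  | nil => simp [goA]
  | cons item rest ih =>
    have hx : x < l2.length := by simp at h; omega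
    have hget : PySem.List.pyGet? l2 (Int.ofNat x) = some l2[x] := by
      rw [show (Int.ofNat x) = (x : Int) from rfl, PySem.List.pyGet?_natCast]
      simp [List.getElem?_eq_getElem hx]
    have hdrop : l2.drop x = l2[x] :: l2.drop (x + 1) := List.drop_eq_getElem_cons hx
    rw [hdrop]
    simp only [List.zip_cons_cons, List.foldl_cons, goA, hget]
    rw [ih (x + 1) _ (by simp at h ⊢; omega)]
    congr 1

-- core: a fold of unit bumps is the pointwise add of the mismatch counts
theorem cntF_cons_match (p : String × String) (ps : List (String × String)) (a b : String)
    (hm : p.1 = p.2) : cntF (p :: ps) a b = cntF ps a b := by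
  simp [cntF, List.filter_cons, hm]

theorem cntF_cons_mismatch (p : String × String) (ps : List (String × String)) (a b : String)
    (hm : p.1 ≠ p.2) :
    cntF (p :: ps) a b = (if a = p.1 ∧ b = p.2 then 1 else 0) + cntF ps a b := by
  unfold cntF
  rw [List.filter_cons, if_pos (by simpa using hm), List.count_cons]
  by_cases hab : a = p.1 ∧ b = p.2
  · have hbeq : (p == (a, b)) = true := by
      obtain ⟨h1, h2⟩ := hab
      cases p
      simp only at h1 h2
      simp [h1, h2]
    rw [hbeq, if_pos rfl, if_pos hab]
    push_cast
    ring
  · have hbeq : (p == (a, b)) = false := by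
      cases p
      rw [beq_eq_false_iff_ne]
      intro hpe
      rw [Prod.mk.injEq] at hpe
      exact hab ⟨hpe.1.symm, hpe.2.symm⟩
    rw [hbeq, if_neg (by simp), if_neg hab]
    push_cast
    ring

theorem foldP_eq_mapAdd (pairs : List (String × String)) (d : List (String × List (String × Int)))
    (hk : ∀ p ∈ pairs, p.1 ≠ p.2 → keyOk d p.1 p.2) (hnd : nodups d) :
    pairs.foldl stepP d = mapAdd d (cntF pairs) := by
  induction pairs generalizing d with
  | nil =>
    simp only [List.foldl_nil]
    symm; apply mapAdd_zero
    intro e _ e2 _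
    simp [cntF]
  | cons p ps ih =>
    simp only [List.foldl_cons]
    by_cases hm : p.1 = p.2
    · have hstep : stepP d p = d := by simp [stepP, hm]
      rw [hstep, ih d (fun q hq => hk q (by simp [hq])) hnd]
      exact mapAdd_congr d _ _ (fun a b => (cntF_cons_match p ps a b hm).symm)
    · have hkp : keyOk d p.1 p.2 := hk p (by simp) hm
      have hstep : stepP d p = mapAdd d (delta p.1 p.2 1) := by
        simp only [stepP, if_pos hm]
        rw [reset_add]
        exact setN_read d p.1 p.2 1 hkp hnd
      rw [hstep, ih _ (fun q hq hq2 => (keyOk_mapAdd d _ q.1 q.2).mpr (hk q (by simp [hq]) hq2))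
            (nodups_mapAdd d _ hnd), mapAdd_comp]
      apply mapAdd_congr
      intro a b
      rw [cntF_cons_mismatch p ps a b hm]
      simp [delta]

-- counter lemmas
def lkC : List ((String × String) × Int) → (String × String) → Int
  | [], _ => 0
  | (q, n) :: t, p => if q = p then n else lkC t p

theorem lkC_incr (c : List ((String × String) × Int)) (p q : String × String) :
    lkC (incr c p) q = lkC c q + (if q = p then 1 else 0) := by
  induction c with
  | nil =>
    by_cases h : q = p
    · subst h; simp [incr, lkC]
    · have hpq : ¬ (p = q) := fun hh => h hh.symm
      simp [incr, lkC, h, hpq]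
  | cons e t ih =>
    obtain ⟨r, m⟩ := e
    simp only [incr]
    by_cases hrp : r = p
    · subst hrp
      simp only [if_pos rfl, lkC]
      by_cases hq : r = q
      · subst hq; simp [lkC]
      · have h2 : ¬ (q = r) := fun hh => hq hh.symm
        simp [lkC, hq, h2]
    · simp only [if_neg hrp, lkC]
      by_cases hq : r = q
      · have h2 : ¬ (q = p) := by rintro rfl; exact hrp hq
        simp [hq, h2]
      · simp [hq, ih]

theorem lkC_zero_of_not_mem (c : List ((String × String) × Int)) (q : String × String)
    (h : q ∉ c.map Prod.fst) : lkC c q = 0 := by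
  induction c with
  | nil => rfl
  | cons e t ih =>
    simp only [List.map_cons, List.mem_cons] at h
    push_neg at h
    simp only [lkC]
    have : ¬ (e.1 = q) := fun hh => h.1 hh.symm
    cases e
    simp only at this
    simp [this, ih h.2]

theorem keys_incr (c : List ((String × String) × Int)) (p : String × String) :
    (incr c p).map Prod.fst = if p ∈ c.map Prod.fst then c.map Prod.fst else c.map Prod.fst ++ [p] := by
  induction c with
  | nil => simp [incr]
  | cons e t ih =>
    obtain ⟨r, m⟩ := e
    simp only [incr, List.map_cons, List.mem_cons]
    by_cases hrp : r = p
    · simp [hrp]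
    · have : ¬ (p = r) := fun h => hrp h.symm
      simp only [if_neg hrp, List.map_cons, ih]
      by_cases hmem : p ∈ t.map Prod.fst
      · simp [hmem, this]
      · simp [hmem, this]

theorem nodup_keys_incr (c : List ((String × String) × Int)) (p : String × String)
    (h : (c.map Prod.fst).Nodup) : ((incr c p).map Prod.fst).Nodup := by
  rw [keys_incr]
  by_cases hmem : p ∈ c.map Prod.fst
  · simpa [hmem]
  · simp only [if_neg hmem]
    rw [List.nodup_append]
    refine ⟨h, List.nodup_singleton p, ?_⟩
    intro x hx y hy
    rw [List.mem_singleton] at hy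
    subst hy
    exact fun hxy => hmem (hxy ▸ hx)

theorem mem_keys_incr (c : List ((String × String) × Int)) (p q : String × String)
    (h : q ∈ (incr c p).map Prod.fst) : q ∈ c.map Prod.fst ∨ q = p := by
  rw [keys_incr] at h
  by_cases hmem : p ∈ c.map Prod.fst
  · simp only [if_pos hmem] at h; exact Or.inl h
  · simp only [if_neg hmem, List.mem_append, List.mem_singleton] at h
    exact h

theorem counter_nodup (pairs : List (String × String)) (c : List ((String × String) × Int))
    (h : (c.map Prod.fst).Nodup) :
    ((pairs.foldl (fun c p => if p.1 ≠ p.2 then incr c p else c) c).map Prod.fst).Nodup := by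
  induction pairs generalizing c with
  | nil => exact h
  | cons p ps ih =>
    simp only [List.foldl_cons]
    by_cases hm : p.1 = p.2
    · simp only [hm, ne_eq, not_true_eq_false, ite_false]
      exact ih c h
    · simp only [ne_eq, hm, not_false_eq_true, ite_true]
      exact ih _ (nodup_keys_incr c p h)

theorem counter_mem (pairs : List (String × String)) (c : List ((String × String) × Int))
    (q : String × String)
    (h : q ∈ (pairs.foldl (fun c p => if p.1 ≠ p.2 then incr c p else c) c).map Prod.fst) :
    q ∈ c.map Prod.fst ∨ (q ∈ pairs ∧ q.1 ≠ q.2) := by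
  induction pairs generalizing c with
  | nil => exact Or.inl h
  | cons p ps ih =>
    simp only [List.foldl_cons] at h
    by_cases hm : p.1 = p.2
    · simp only [hm, ne_eq, not_true_eq_false, ite_false] at h
      rcases ih c h with h1 | h2
      · exact Or.inl h1
      · exact Or.inr ⟨by simp [h2.1], h2.2⟩
    · simp only [ne_eq, hm, not_false_eq_true, ite_true] at h
      rcases ih _ h with h1 | h2
      · rcases mem_keys_incr c p q h1 with h3 | h3
        · exact Or.inl h3
        · exact Or.inr ⟨by simp [h3], h3 ▸ hm⟩
      · exact Or.inr ⟨by simp [h2.1], h2.2⟩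

theorem lkC_counter (pairs : List (String × String)) (c : List ((String × String) × Int))
    (q : String × String) :
    lkC (pairs.foldl (fun c p => if p.1 ≠ p.2 then incr c p else c) c) q
      = lkC c q + cntF pairs q.1 q.2 := by
  induction pairs generalizing c with
  | nil => simp [cntF]
  | cons p ps ih =>
    simp only [List.foldl_cons]
    by_cases hm : p.1 = p.2
    · simp only [hm, ne_eq, not_true_eq_false, ite_false, ih]
      rw [cntF_cons_match p ps q.1 q.2 hm]
    · simp only [ne_eq, hm, not_false_eq_true, ite_true, ih, lkC_incr]
      rw [cntF_cons_mismatch p ps q.1 q.2 hm]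
      by_cases hqp : q = p
      · rw [if_pos hqp, if_pos (by rw [hqp]; exact ⟨rfl, rfl⟩)]
        ring
      · rw [if_neg hqp, if_neg (fun hc => hqp (Prod.ext_iff.mpr hc))]
        ring

theorem foldC_eq_mapAdd (c : List ((String × String) × Int)) (d : List (String × List (String × Int)))
    (hk : ∀ q ∈ c.map Prod.fst, keyOk d q.1 q.2) (hnc : (c.map Prod.fst).Nodup) (hnd : nodups d) :
    c.foldl (fun d pn =>
      let cur := readD d pn.1.1 pn.1.2
      let cur := if cur = 0 then 0 else cur
      setN d pn.1.1 pn.1.2 (cur + pn.2)) d = mapAdd d (fun a b => lkC c (a, b)) := by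
  induction c generalizing d with
  | nil =>
    simp only [List.foldl_nil]
    symm; apply mapAdd_zero
    intro e _ e2 _
    rfl
  | cons qn t ih =>
    obtain ⟨q, n⟩ := qn
    have hnc2 := hnc
    rw [List.map_cons, List.nodup_cons] at hnc2
    simp only [List.foldl_cons]
    have hkq : keyOk d q.1 q.2 := hk q (by simp)
    have hstep : (let cur := readD d q.1 q.2;
        let cur := if cur = 0 then 0 else cur;
        setN d q.1 q.2 (cur + n)) = mapAdd d (delta q.1 q.2 n) := by
      simp only
      rw [reset_add]
      exact setN_read d q.1 q.2 n hkq hnd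
    rw [hstep,
        ih _ (fun r hr => (keyOk_mapAdd d _ r.1 r.2).mpr (hk r (by simp [hr])))
          hnc2.2
          (nodups_mapAdd d _ hnd),
        mapAdd_comp]
    apply mapAdd_congr
    intro a b
    simp only [delta, lkC]
    by_cases hab : a = q.1 ∧ b = q.2
    · have hq : q = (a, b) := by
        obtain ⟨h1, h2⟩ := hab
        cases q
        simp only at h1 h2
        simp [h1, h2]
      have hnot : (a, b) ∉ t.map Prod.fst := by
        rw [← hq]
        exact hnc2.1
      rw [if_pos hab, if_pos hq, lkC_zero_of_not_mem t (a, b) hnot]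
      ring
    · have hq : ¬ (q = (a, b)) := by
        intro h
        cases q
        simp only [Prod.mk.injEq] at h
        exact hab ⟨h.1.symm, h.2.symm⟩
      rw [if_neg hab, if_neg hq]
      ring

-- ===== VERDICT (by name: the statement is the Claim_ definition above) =====
theorem compareAlleltList_spec : Claim_equal_compareAlleltList := by
  intro l1 l2 d _ hpre
  obtain ⟨hlen, hkeys, hn1, hn2⟩ := hpre
  have hA : goA l1 l2 0 d = mapAdd d (cntF (l1.zip l2)) := by
    rw [goA_eq_foldP l1 l2 0 d (by omega)]
    rw [List.drop_zero]
    exact foldP_eq_mapAdd _ d (fun p hp hm => hkeys p hp hm) ⟨hn1, hn2⟩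
  have hkc : ∀ q ∈ ((l1.zip l2).foldl (fun c p => if p.1 ≠ p.2 then incr c p else c) []).map Prod.fst,
      keyOk d q.1 q.2 := by
    intro q hq
    rcases counter_mem _ [] q hq with h1 | h2
    · simp at h1
    · exact hkeys q h2.1 h2.2
  have hB : ((l1.zip l2).foldl (fun c p => if p.1 ≠ p.2 then incr c p else c) []).foldl
      (fun d pn =>
        let cur := readD d pn.1.1 pn.1.2
        let cur := if cur = 0 then 0 else cur
        setN d pn.1.1 pn.1.2 (cur + pn.2)) d = mapAdd d (cntF (l1.zip l2)) := by
    rw [foldC_eq_mapAdd _ d hkc (counter_nodup _ [] (by simp)) ⟨hn1, hn2⟩]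
    apply mapAdd_congr
    intro a b
    have h := lkC_counter (l1.zip l2) [] (a, b)
    simpa [lkC] using h
  exact hA.trans hB.symm
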